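-- pv_equiv track=rewrite | github.com/khoruzhii/polytof | scripts/make_cpd_gf.py | poly_eval_gf2n
-- ===== SOURCE A (Python) =====
-- PRIMITIVE_POLYS = {
--     2:  [2, 1, 0],          # x^2  + x   + 1
--     3:  [3, 1, 0],          # x^3  + x   + 1
--     4:  [4, 1, 0],          # x^4  + x   + 1
--     5:  [5, 2, 0],          # x^5  + x^2 + 1
--     6:  [6, 1, 0],          # x^6  + x   + 1
--     7:  [7, 1, 0],          # x^7  + x   + 1
--     8:  [8, 4, 3, 2, 0],    # x^8  + x^4 + x^3 + x^2 + 1  (AES)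
--     9:  [9, 4, 0],          # x^9  + x^4 + 1
--     10: [10, 3, 0],         # x^10 + x^3 + 1
-- }
--
-- def _mod_poly_int(n):
--     poly = 0
--     for e in PRIMITIVE_POLYS[n]:
--         poly |= 1 << e
--     return poly
--
-- def gf2n_mul(a, b, n):
--     """Multiply a, b in GF(2^n) using PRIMITIVE_POLYS[n]."""
--     mod = _mod_poly_int(n)
--     red = mod ^ (1 << n)
--     mask = (1 << n) - 1
--     a &= mask
--     b &= mask
--     res = 0
--     for _ in range(n):
--         if b & 1:
--             res ^= a
--         carry = a & (1 << (n - 1))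
--         a = (a << 1) & mask
--         if carry:
--             a ^= red
--         b >>= 1
--     return res & mask
--
-- def poly_eval_gf2n(coeffs, x, n):
--     """Evaluate sum_i coeffs[i] * x^i in GF(2^n)."""
--     res = 0
--     xp = 1
--     for c in coeffs:
--         if c & 1:
--             res ^= xp
--         xp = gf2n_mul(xp, x, n)
--     return res
-- ===== SOURCE B (Python) =====
-- # GF(2^n) polynomial evaluation by Horner's rule with carry-less multiply + separate reduction.
--
-- MOD_INT = {
--     2:  0b111,           # x^2  + x   + 1
--     3:  0b1011,          # x^3  + x   + 1
--     4:  0b10011,         # x^4  + x   + 1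
--     5:  0b100101,        # x^5  + x^2 + 1
--     6:  0b1000011,       # x^6  + x   + 1
--     7:  0b10000011,      # x^7  + x   + 1
--     8:  0b100011101,     # x^8  + x^4 + x^3 + x^2 + 1  (AES)
--     9:  0b1000010001,    # x^9  + x^4 + 1
--     10: 0b10000001001,   # x^10 + x^3 + 1
-- }
--
--
-- def _clmul(a, b):
--     """Carry-less (GF(2) polynomial) product of a and b."""
--     r = 0
--     while b > 0:
--         if b & 1:
--             r ^= a
--         a <<= 1
--         b >>= 1
--     return r
--
--
-- def _gf_mul(a, b, n):
--     """Multiply in GF(2^n): full carry-less product, then one reduction pass."""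
--     mask = (1 << n) - 1
--     mod = MOD_INT[n]
--     p = _clmul(a & mask, b & mask)
--     for i in reversed(range(n, 2 * n - 1)):
--         if (p >> i) & 1:
--             p ^= mod << (i - n)
--     return p
--
--
-- def poly_eval_gf2n(coeffs, x, n):
--     """Evaluate sum_i coeffs[i] * x^i in GF(2^n) by Horner's rule."""
--     res = 0
--     for c in reversed(coeffs):
--         res = _gf_mul(res, x, n) ^ (c & 1)
--     return res
-- ===== Notes on version B (the rewrite author's own statement) =====
-- stated objective: alternative
-- what changed: Replaces A's successive-powers evaluation with interleaved per-step reduction (Russian-peasant gf2n_mul inside a power accumulator loop) by Horner's rule over reversed coefficients using a carry-less multiply followed by a separate top-down modular-reduction pass against an integer-encoded modulus table.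
import Mathlib
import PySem

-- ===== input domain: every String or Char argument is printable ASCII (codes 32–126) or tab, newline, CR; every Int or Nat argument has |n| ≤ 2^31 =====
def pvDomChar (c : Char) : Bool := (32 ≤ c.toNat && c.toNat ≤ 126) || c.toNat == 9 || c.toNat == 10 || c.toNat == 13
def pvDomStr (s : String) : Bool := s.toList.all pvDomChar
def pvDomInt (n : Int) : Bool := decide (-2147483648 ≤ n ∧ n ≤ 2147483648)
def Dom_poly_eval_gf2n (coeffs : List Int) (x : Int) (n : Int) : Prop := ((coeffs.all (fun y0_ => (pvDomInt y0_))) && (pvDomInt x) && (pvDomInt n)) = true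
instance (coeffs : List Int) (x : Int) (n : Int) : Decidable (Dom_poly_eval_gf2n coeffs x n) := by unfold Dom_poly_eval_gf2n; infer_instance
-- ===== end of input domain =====

-- B evaluates by Horner's rule with a carry-less multiply and a separate reduction pass,
-- instead of A's successive-powers loop with per-step-reduced multiplication (objective:
-- alternative; same asymptotic cost).


-- ===== PORT A =====
def PRIMITIVE_POLYS : PySem.Dict Int (List Int) :=
  PySem.Dict.ofList
  [(2, [2, 1, 0]), (3, [3, 1, 0]), (4, [4, 1, 0]), (5, [5, 2, 0]), (6, [6, 1, 0]),
   (7, [7, 1, 0]), (8, [8, 4, 3, 2, 0]), (9, [9, 4, 0]), (10, [10, 3, 0])]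

-- Python raises KeyError for n outside the dict; getD [] is exact on Pre_ (lookup succeeds there,
-- and for empty coeffs no lookup ever happens in either program).  Exponents e in the dict are
-- nonnegative, so e.toNat is exact for 1 << e.
def _mod_poly_int (n : Int) : Int :=
  (PySem.Dict.getD PRIMITIVE_POLYS n []).foldl (fun poly e => PySem.Int.bor poly (1 <<< e.toNat)) 0

-- loop body of gf2n_mul, state (a, b, res); `if carry:` / `if b & 1:` = truthiness (≠ 0)
def gf2n_step (mask red h : Int) (s : Int × Int × Int) : Int × Int × Int :=
  let res := if PySem.Int.band s.2.1 1 ≠ 0 then PySem.Int.bxor s.2.2 s.1 else s.2.2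
  let carry := PySem.Int.band s.1 h
  let a := PySem.Int.band (s.1 <<< 1) mask
  let a := if carry ≠ 0 then PySem.Int.bxor a red else a
  (a, s.2.1 >>> 1, res)

-- n.toNat is exact for the shifts since Pre_ gives 2 ≤ n whenever the loop runs (Python raises on n < 0)
def gf2n_mul (a b n : Int) : Int :=
  let mod := _mod_poly_int n
  let red := PySem.Int.bxor mod (1 <<< n.toNat)
  let mask := (1 <<< n.toNat) - 1
  let s := (PySem.List.pyRange 0 n 1).foldl
    (fun s _ => gf2n_step mask red (1 <<< (n.toNat - 1)) s)
    (PySem.Int.band a mask, PySem.Int.band b mask, 0)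
  PySem.Int.band s.2.2 mask

def poly_eval_gf2n (coeffs : List Int) (x : Int) (n : Int) : Int :=
  (coeffs.foldl
    (fun (s : Int × Int) c =>
      ((if PySem.Int.band c 1 ≠ 0 then PySem.Int.bxor s.1 s.2 else s.1), gf2n_mul s.2 x n))
    (0, 1)).1

-- ===== PORT B =====
-- B's table: the same primitive moduli, pre-encoded as integers.
def MOD_INT : PySem.Dict Int Int :=
  PySem.Dict.ofList
  [(2, 7), (3, 11), (4, 19), (5, 37), (6, 67), (7, 131), (8, 285), (9, 529), (10, 1033)]

-- `while b > 0:` of _clmul, as recursion on b.toNat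
def _clmulAux (a b r : Int) : Int :=
  if h : 0 < b then
    _clmulAux (a <<< 1) (b >>> 1)
      (if PySem.Int.band b 1 ≠ 0 then PySem.Int.bxor r a else r)
  else r
termination_by b.toNat
decreasing_by
  rcases b with m | m
  · rw [show (Int.ofNat m) = ((m : Nat) : Int) from rfl,
      show (1:Int) = ((1:Nat) : Int) from rfl, Int.shiftRight_natCast,
      Int.toNat_natCast, Int.toNat_natCast, Nat.shiftRight_eq_div_pow]
    have hm : 0 < m := by exact_mod_cast (show (0:Int) < ((m:Nat):Int) from h)
    omega
  · exact absurd h (asymm (Int.negSucc_lt_zero m))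

def _clmul (a b : Int) : Int := _clmulAux a b 0

-- Python raises KeyError for n outside MOD_INT (outside Pre_; getD 0 there); n ≥ 0 whenever
-- the evaluation loop runs, and each loop index i satisfies i ≥ n ≥ 0, so the .toNat casts of
-- the shift amounts are exact.
def _gf_mul (a b n : Int) : Int :=
  let mask := (1 <<< n.toNat) - 1
  let mod := PySem.Dict.getD MOD_INT n 0
  let p := _clmul (PySem.Int.band a mask) (PySem.Int.band b mask)
  ((PySem.List.pyRange n (2*n - 1) 1).reverse).foldl
    (fun p i =>
      if PySem.Int.band (p >>> i.toNat) 1 ≠ 0 then PySem.Int.bxor p (mod <<< (i - n).toNat)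
      else p)
    p

def poly_eval_gf2n_alt (coeffs : List Int) (x : Int) (n : Int) : Int :=
  coeffs.reverse.foldl (fun res c => PySem.Int.bxor (_gf_mul res x n) (PySem.Int.band c 1)) 0

-- ===== PRECONDITION & SPEC =====
-- Pre_ excludes exactly the inputs where Python A raises: a nonempty coeffs list with n outside
-- PRIMITIVE_POLYS (KeyError in gf2n_mul); with empty coeffs the loop never runs and A returns 0.
def Pre_poly_eval_gf2n (coeffs : List Int) (x : Int) (n : Int) : Prop :=
  coeffs = [] ∨ (2 ≤ n ∧ n ≤ 10)
instance (coeffs : List Int) (x : Int) (n : Int) : Decidable (Pre_poly_eval_gf2n coeffs x n) := by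
  unfold Pre_poly_eval_gf2n; infer_instance

def pvWitness_poly_eval_gf2n : List Int × Int × Int := ([1, 0, 3, 2], 5, 4)

def Spec_poly_eval_gf2n (coeffs : List Int) (x : Int) (n : Int) (out : Int) : Prop := out = poly_eval_gf2n_alt coeffs x n
instance (coeffs : List Int) (x : Int) (n : Int) (out : Int) : Decidable (Spec_poly_eval_gf2n coeffs x n out) := by unfold Spec_poly_eval_gf2n; infer_instance

-- ===== CLAIM (what is proved, stated in full; the proofs are below) =====
def Claim_equal_poly_eval_gf2n : Prop := ∀ (coeffs : List Int) (x : Int) (n : Int), Dom_poly_eval_gf2n coeffs x n → Pre_poly_eval_gf2n coeffs x n → Spec_poly_eval_gf2n coeffs x n (poly_eval_gf2n coeffs x n)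

-- ===== LEMMAS AND PROOFS =====

----------------------------------------------------------------
-- Part 1: Nat-level machinery for the two multiplications.
----------------------------------------------------------------

-- Nat mirror of the A-side multiplication loop body (state (a, b, res))
def gstep (m r h : Nat) (s : Nat × Nat × Nat) : Nat × Nat × Nat :=
  let res := if s.2.1 &&& 1 ≠ 0 then s.2.2 ^^^ s.1 else s.2.2
  let a := (s.1 <<< 1) &&& m
  let a := if s.1 &&& h ≠ 0 then a ^^^ r else a
  (a, s.2.1 >>> 1, res)

-- A's per-step-reduced doubling of the power accumulator
def astep (M N a : Nat) : Nat :=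
  if a &&& 2 ^ (N - 1) ≠ 0 then ((a <<< 1) &&& (2 ^ N - 1)) ^^^ (M ^^^ 2 ^ N)
  else (a <<< 1) &&& (2 ^ N - 1)

-- A's multiplication as a fuelled recursion over the low bits of b
def Fm (M N : Nat) : Nat → Nat → Nat → Nat
  | 0, _, _ => 0
  | k+1, a, b => (if b &&& 1 ≠ 0 then a else 0) ^^^ Fm M N k (astep M N a) (b >>> 1)

-- Nat mirror of _clmul
def clm (a b : Nat) : Nat :=
  if b = 0 then 0 else (if b &&& 1 ≠ 0 then a else 0) ^^^ clm (a <<< 1) (b >>> 1)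
termination_by b
decreasing_by
  rw [Nat.shiftRight_eq_div_pow]
  omega

-- one reduction step at bit i
def rstep (M N i p : Nat) : Nat :=
  if (p >>> i) &&& 1 ≠ 0 then p ^^^ (M <<< (i - N)) else p

-- k reduction steps, at bits N+k-1 down to N
def redSeq (M N : Nat) : Nat → Nat → Nat
  | 0, p => p
  | k+1, p => redSeq M N k (rstep M N (N + k) p)

def descNat (N K : Nat) : List Nat := (List.range K).reverse.map (fun k => N + k)

def bigXor (k : Nat) (g : Nat → Nat) : Nat := (List.range k).foldr (fun i acc => g i ^^^ acc) 0

lemma tb_iff (p i : Nat) : ((p >>> i) &&& 1 ≠ 0) ↔ p.testBit i = true := by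
  simp [Nat.testBit, Nat.and_comm]

lemma and_pow_ne_iff (a k : Nat) : (a &&& 2 ^ k ≠ 0) ↔ a.testBit k = true := by
  rw [Nat.and_two_pow]
  cases hb : a.testBit k
  · simp
  · simpa using (Nat.two_pow_pos k).ne'

lemma lt_of_testBit_false {p i : Nat} (hp : p < 2 ^ (i+1)) (ht : p.testBit i = false) :
    p < 2 ^ i := by
  by_contra hge
  push_neg at hge
  have h2 : p < 2 * 2 ^ i := by
    rw [pow_succ] at hp
    omega
  have hdiv : p >>> i = 1 := by
    rw [Nat.shiftRight_eq_div_pow]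
    exact Nat.div_eq_of_lt_le (by omega) (by omega)
  have h3 : p.testBit i = true := by simp [Nat.testBit, hdiv]
  simp [h3] at ht

lemma red_lt {M N : Nat} (hM : M.testBit N = true) (hMlt : M < 2 ^ (N+1)) :
    M ^^^ 2 ^ N < 2 ^ N := by
  have hx : (M ^^^ 2 ^ N) < 2 ^ (N+1) :=
    Nat.xor_lt_two_pow hMlt (Nat.pow_lt_pow_succ (by norm_num))
  refine lt_of_testBit_false hx ?_
  rw [Nat.testBit_xor, hM, Nat.testBit_two_pow_self]
  rfl

lemma astep_lt {M N : Nat} (hM : M.testBit N = true) (hMlt : M < 2 ^ (N+1)) (a : Nat) :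
    astep M N a < 2 ^ N := by
  have hand : (a <<< 1) &&& (2 ^ N - 1) < 2 ^ N := by
    have h1 := Nat.and_le_right (n := a <<< 1) (m := 2 ^ N - 1)
    have h2 : 0 < (2:Nat) ^ N := Nat.two_pow_pos N
    omega
  unfold astep
  split
  · exact Nat.xor_lt_two_pow hand (red_lt hM hMlt)
  · exact hand

lemma Fm_lt {M N : Nat} (hM : M.testBit N = true) (hMlt : M < 2 ^ (N+1)) :
    ∀ (k a b : Nat), a < 2 ^ N → Fm M N k a b < 2 ^ N := by
  intro k
  induction k with
  | zero => intro a b _; exact Nat.two_pow_pos N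
  | succ k ih =>
    intro a b ha
    refine Nat.xor_lt_two_pow ?_ (ih _ _ (astep_lt hM hMlt a))
    split
    · exact ha
    · exact Nat.two_pow_pos N

lemma rstep_zero (M N i : Nat) : rstep M N i 0 = 0 := by simp [rstep]

lemma rstep_self {M N i p : Nat} (hp : p < 2 ^ i) : rstep M N i p = p := by
  unfold rstep
  rw [if_neg]
  rw [tb_iff, Nat.testBit_lt_two_pow hp]
  simp

lemma rstep_xor (M N i p q : Nat) :
    rstep M N i (p ^^^ q) = rstep M N i p ^^^ rstep M N i q := by
  unfold rstep
  simp only [tb_iff, Nat.testBit_xor]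
  cases hp : p.testBit i <;> cases hq : q.testBit i <;>
    simp [hp, hq, Nat.xor_assoc, Nat.xor_comm, Nat.xor_left_comm]

lemma redSeq_zero (M N k : Nat) : redSeq M N k 0 = 0 := by
  induction k with
  | zero => rfl
  | succ k ih => rw [redSeq, rstep_zero]; exact ih

lemma redSeq_xor (M N k : Nat) : ∀ p q, redSeq M N k (p ^^^ q) = redSeq M N k p ^^^ redSeq M N k q := by
  induction k with
  | zero => intro p q; rfl
  | succ k ih => intro p q; rw [redSeq, rstep_xor, ih, redSeq, redSeq]

lemma redSeq_pad {M N : Nat} : ∀ {m k p : Nat}, k ≤ m → p < 2 ^ (N + k) →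
    redSeq M N m p = redSeq M N k p := by
  intro m
  induction m with
  | zero => intro k p hk _; rw [Nat.le_zero.mp hk]
  | succ m ih =>
    intro k p hk hp
    rcases Nat.lt_or_ge k (m+1) with hlt | hge
    · have hk' : k ≤ m := by omega
      have hppad : p < 2 ^ (N + m) :=
        lt_of_lt_of_le hp (Nat.pow_le_pow_right (by norm_num) (by omega))
      rw [redSeq, rstep_self hppad, ih hk' hp]
    · have : k = m+1 := by omega
      rw [this]

lemma rstep_shift {M N i : Nat} (hi : N ≤ i) (p : Nat) :
    rstep M N (i+1) (p <<< 1) = (rstep M N i p) <<< 1 := by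
  unfold rstep
  have hcond : (((p <<< 1) >>> (i+1)) &&& 1 ≠ 0) ↔ ((p >>> i) &&& 1 ≠ 0) := by
    rw [tb_iff, tb_iff, Nat.testBit_shiftLeft]
    simp [show i + 1 - 1 = i by omega]
  rw [if_congr hcond rfl rfl]
  split
  · have h1 : i + 1 - N = (i - N) + 1 := by omega
    rw [h1, Nat.shiftLeft_add M (i - N) 1, Nat.shiftLeft_xor_distrib]
  · rfl

lemma rstep_shiftk (M N : Nat) : ∀ (k q : Nat),
    rstep M N (N + k) (q <<< k) = (rstep M N N q) <<< k := by
  intro k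
  induction k with
  | zero => intro q; simp
  | succ k ih =>
    intro q
    have h1 : q <<< (k+1) = (q <<< k) <<< 1 := by rw [← Nat.shiftLeft_add]
    rw [h1, show N + (k+1) = (N + k) + 1 from rfl, rstep_shift (by omega), ih,
      ← Nat.shiftLeft_add]

lemma xor_two_pow_eq_mask {N x : Nat} (hx : x < 2 ^ (N+1)) (hb : x.testBit N = true) :
    x ^^^ 2 ^ N = x &&& (2 ^ N - 1) := by
  apply Nat.eq_of_testBit_eq
  intro j
  rw [Nat.testBit_xor, Nat.testBit_and, Nat.testBit_two_pow, Nat.testBit_two_pow_sub_one]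
  rcases Nat.lt_trichotomy j N with h | h | h
  · simp [h, Nat.ne_of_gt h]
  · subst h
    simp [hb]
  · have hj : x.testBit j = false :=
      Nat.testBit_lt_two_pow (lt_of_lt_of_le hx (Nat.pow_le_pow_right (by norm_num) (by omega)))
    simp [hj, Nat.ne_of_lt h, Nat.not_lt.2 (le_of_lt h)]

lemma rstep_N_eq_astep {M N a : Nat} (hN : 1 ≤ N) (ha : a < 2 ^ N) :
    rstep M N N (a <<< 1) = astep M N a := by
  have htb : (a <<< 1).testBit N = a.testBit (N-1) := by
    rw [Nat.testBit_shiftLeft]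
    simp [hN]
  have hcond : (((a <<< 1) >>> N) &&& 1 ≠ 0) ↔ (a &&& 2 ^ (N-1) ≠ 0) := by
    rw [tb_iff, htb, and_pow_ne_iff]
  have hx : a <<< 1 < 2 ^ (N+1) := by
    rw [Nat.shiftLeft_eq, pow_one, pow_succ]
    omega
  unfold rstep astep
  rw [if_congr hcond rfl rfl]
  split_ifs with h
  · have hbN : (a <<< 1).testBit N = true := by
      rw [htb, ← and_pow_ne_iff]
      exact h
    rw [Nat.sub_self, Nat.shiftLeft_zero, ← xor_two_pow_eq_mask hx hbN]
    have hac : ∀ x t m : Nat, (x ^^^ t) ^^^ (m ^^^ t) = x ^^^ m := by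
      intro x t m
      rw [Nat.xor_comm m t, ← Nat.xor_assoc, Nat.xor_assoc x t t, Nat.xor_self, Nat.xor_zero]
    rw [hac]
  · have hbN : (a <<< 1).testBit N = false := by
      rw [htb]
      cases hb : a.testBit (N-1)
      · rfl
      · exact absurd ((and_pow_ne_iff a (N-1)).mpr hb) h
    have hlt : a <<< 1 < 2 ^ N := lt_of_testBit_false hx hbN
    rw [Nat.and_two_pow_sub_one_eq_mod, Nat.mod_eq_of_lt hlt]

lemma redSeq_pow {M N : Nat} (hN : 1 ≤ N) (hM : M.testBit N = true) (hMlt : M < 2 ^ (N+1)) :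
    ∀ (k a : Nat), a < 2 ^ N → redSeq M N k (a <<< k) = (astep M N)^[k] a := by
  intro k
  induction k with
  | zero => intro a _; simp [redSeq]
  | succ k ih =>
    intro a ha
    have h1 : a <<< (k+1) = (a <<< 1) <<< k := by
      rw [← Nat.shiftLeft_add, Nat.add_comm]
    rw [redSeq, h1, rstep_shiftk, rstep_N_eq_astep hN ha,
      ih _ (astep_lt hM hMlt a), ← Function.iterate_succ_apply]

lemma bigXor_succ (k : Nat) (g : Nat → Nat) :
    bigXor (k+1) g = g 0 ^^^ bigXor k (fun i => g (i+1)) := by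
  unfold bigXor
  rw [List.range_succ_eq_map, List.foldr_cons, List.foldr_map]

lemma bigXor_congr {k : Nat} {g h : Nat → Nat} (hgh : ∀ i, i < k → g i = h i) :
    bigXor k g = bigXor k h := by
  induction k generalizing g h with
  | zero => rfl
  | succ k ih =>
    rw [bigXor_succ, bigXor_succ, hgh 0 (by omega),
      ih (fun i hi => hgh (i+1) (by omega))]

lemma bigXor_zero_fun (k : Nat) : bigXor k (fun _ => 0) = 0 := by
  induction k with
  | zero => rfl
  | succ k ih => rw [bigXor_succ]; simpa using ih

lemma redSeq_bigXor (M N m : Nat) : ∀ (k : Nat) (g : Nat → Nat),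
    redSeq M N m (bigXor k g) = bigXor k (fun i => redSeq M N m (g i)) := by
  intro k
  induction k with
  | zero => intro g; exact redSeq_zero M N m
  | succ k ih =>
    intro g
    rw [bigXor_succ, redSeq_xor, ih, bigXor_succ]

lemma Fm_eq_bigXor (M N : Nat) : ∀ (k a b : Nat),
    Fm M N k a b = bigXor k (fun i => if b.testBit i then (astep M N)^[i] a else 0) := by
  intro k
  induction k with
  | zero => intro a b; rfl
  | succ k ih =>
    intro a b
    rw [Fm, ih, bigXor_succ]
    have h0 : (b &&& 1 ≠ 0) ↔ (b.testBit 0 = true) := by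
      have h1 := tb_iff b 0
      rwa [Nat.shiftRight_zero] at h1
    congr 1
    · rw [Function.iterate_zero_apply]
      exact if_congr h0 rfl rfl
    · apply bigXor_congr
      intro i _
      rw [Nat.testBit_shiftRight, Nat.add_comm 1 i, Function.iterate_succ_apply]

lemma clm_eq_bigXor : ∀ (j a b : Nat), b < 2 ^ j →
    clm a b = bigXor j (fun i => if b.testBit i then a <<< i else 0) := by
  intro j
  induction j with
  | zero =>
    intro a b hb
    have hb0 : b = 0 := by omega
    subst hb0
    rw [clm]
    simp [bigXor]
  | succ j ih =>
    intro a b hb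
    by_cases hb0 : b = 0
    · subst hb0
      have hclm : clm a 0 = 0 := by rw [clm]; simp
      rw [hclm]
      exact ((bigXor_congr (fun i _ => by simp [Nat.zero_testBit])).trans
        (bigXor_zero_fun (j+1))).symm
    · rw [clm, if_neg hb0]
      have hb' : b >>> 1 < 2 ^ j := by
        rw [Nat.shiftRight_eq_div_pow]
        rw [pow_succ] at hb
        omega
      rw [ih _ _ hb', bigXor_succ]
      have h0 : (b &&& 1 ≠ 0) ↔ (b.testBit 0 = true) := by
        have h1 := tb_iff b 0
        rwa [Nat.shiftRight_zero] at h1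
      congr 1
      · exact if_congr h0 rfl rfl
      · apply bigXor_congr
        intro i _
        rw [Nat.testBit_shiftRight, Nat.add_comm 1 i, ← Nat.shiftLeft_add, Nat.add_comm 1 i]

-- the central Nat-level fact: B's clmul-then-reduce equals A's interleaved loop
lemma main_nat {M N : Nat} (hN : 1 ≤ N) (hM : M.testBit N = true) (hMlt : M < 2 ^ (N+1))
    (a b : Nat) (ha : a < 2 ^ N) (hb : b < 2 ^ N) :
    redSeq M N (N-1) (clm a b) = Fm M N N a b := by
  rw [clm_eq_bigXor N a b hb, redSeq_bigXor, Fm_eq_bigXor]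
  apply bigXor_congr
  intro i hi
  rw [apply_ite (redSeq M N (N-1)), redSeq_zero]
  congr 1
  have hsh : a <<< i < 2 ^ (N + i) := by
    rw [Nat.shiftLeft_eq, pow_add]
    exact mul_lt_mul_of_pos_right ha (Nat.two_pow_pos i)
  rw [redSeq_pad (by omega) hsh, redSeq_pow hN hM hMlt i a ha]

----------------------------------------------------------------
-- Part 2: casts between the Int ports and the Nat machinery.
----------------------------------------------------------------

lemma bxor_nonneg (a b : Int) (ha : 0 ≤ a) (hb : 0 ≤ b) : 0 ≤ PySem.Int.bxor a b := by
  rw [PySem.Int.bxor_of_nonneg ha hb]; exact Int.natCast_nonneg _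

lemma bxor_assoc' (a b c : Int) (ha : 0 ≤ a) (hb : 0 ≤ b) (hc : 0 ≤ c) :
    PySem.Int.bxor (PySem.Int.bxor a b) c = PySem.Int.bxor a (PySem.Int.bxor b c) := by
  obtain ⟨a', rfl⟩ := Int.eq_ofNat_of_zero_le ha
  obtain ⟨b', rfl⟩ := Int.eq_ofNat_of_zero_le hb
  obtain ⟨c', rfl⟩ := Int.eq_ofNat_of_zero_le hc
  simp [Nat.xor_assoc]

lemma gf2n_step_cast (m r h : Nat) (a b c : Nat) :
    gf2n_step (m : Int) (r : Int) (h : Int) ((a : Int), (b : Int), (c : Int)) =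
      (((gstep m r h (a, b, c)).1 : Int), ((gstep m r h (a, b, c)).2.1 : Int),
        ((gstep m r h (a, b, c)).2.2 : Int)) := by
  simp only [gf2n_step, gstep, show (1:Int) = ((1:Nat):Int) from rfl,
    PySem.Int.band_natCast, PySem.Int.bxor_natCast, Int.shiftLeft_natCast,
    Int.shiftRight_natCast, Nat.cast_ne_zero, apply_ite (Nat.cast : Nat → Int)]

lemma gfold_cast (m r h : Nat) (l : List Int) (a b c : Nat) :
    l.foldl (fun s _ => gf2n_step (m : Int) (r : Int) (h : Int) s) ((a : Int), (b : Int), (c : Int)) =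
      (((l.foldl (fun s _ => gstep m r h s) (a, b, c)).1 : Int),
       ((l.foldl (fun s _ => gstep m r h s) (a, b, c)).2.1 : Int),
       ((l.foldl (fun s _ => gstep m r h s) (a, b, c)).2.2 : Int)) := by
  induction l generalizing a b c with
  | nil => rfl
  | cons e l ih =>
    simp only [List.foldl_cons, gf2n_step_cast]
    exact ih _ _ _

lemma gfold_zero (m r h : Nat) (l : List Int) (b : Nat) :
    (l.foldl (fun s _ => gstep m r h s) (0, b, 0)).1 = 0 ∧
    (l.foldl (fun s _ => gstep m r h s) (0, b, 0)).2.2 = 0 := by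
  induction l generalizing b with
  | nil => exact ⟨rfl, rfl⟩
  | cons e l ih =>
    have h0 : gstep m r h (0, b, 0) = (0, b >>> 1, 0) := by simp [gstep]
    rw [List.foldl_cons, h0]
    exact ih _

lemma gstep_lin (m r k : Nat) (p q b c1 c2 : Nat) :
    gstep m r (2 ^ k) (p ^^^ q, b, c1 ^^^ c2) =
      ((gstep m r (2 ^ k) (p, b, c1)).1 ^^^ (gstep m r (2 ^ k) (q, b, c2)).1,
       (gstep m r (2 ^ k) (p, b, c1)).2.1,
       (gstep m r (2 ^ k) (p, b, c1)).2.2 ^^^ (gstep m r (2 ^ k) (q, b, c2)).2.2) := by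
  have hc : ∀ x : Nat, (x &&& 2 ^ k ≠ 0) ↔ x.testBit k = true := by
    intro x
    rw [Nat.and_two_pow]
    cases hx : x.testBit k <;> simp [pow_ne_zero k (two_ne_zero)]
  simp only [gstep, Prod.mk.injEq, hc, Nat.testBit_xor]
  refine ⟨?_, trivial, ?_⟩
  · rw [Nat.shiftLeft_xor_distrib, Nat.and_xor_distrib_right]
    cases hp : p.testBit k <;> cases hq : q.testBit k <;>
      simp [hp, hq, Nat.xor_assoc, Nat.xor_comm, Nat.xor_left_comm]
  · split <;> simp [Nat.xor_assoc, Nat.xor_comm, Nat.xor_left_comm]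

lemma gfold_lin (m r k : Nat) (l : List Int) (p q b c1 c2 : Nat) :
    l.foldl (fun s _ => gstep m r (2 ^ k) s) (p ^^^ q, b, c1 ^^^ c2) =
      ((l.foldl (fun s _ => gstep m r (2 ^ k) s) (p, b, c1)).1 ^^^
         (l.foldl (fun s _ => gstep m r (2 ^ k) s) (q, b, c2)).1,
       (l.foldl (fun s _ => gstep m r (2 ^ k) s) (p, b, c1)).2.1,
       (l.foldl (fun s _ => gstep m r (2 ^ k) s) (p, b, c1)).2.2 ^^^
         (l.foldl (fun s _ => gstep m r (2 ^ k) s) (q, b, c2)).2.2) := by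
  induction l generalizing p q b c1 c2 with
  | nil => rfl
  | cons e l ih =>
    simp only [List.foldl_cons, gstep_lin]
    exact ih _ _ _ _ _

lemma mod_poly_aux (l : List Int) (acc : Int) (hacc : 0 ≤ acc) :
    0 ≤ l.foldl (fun poly e => PySem.Int.bor poly (1 <<< e.toNat)) acc := by
  induction l generalizing acc with
  | nil => exact hacc
  | cons e l ih =>
    refine ih _ ?_
    show 0 ≤ PySem.Int.bor acc ((1 <<< e.toNat : Nat) : Int)
    rw [PySem.Int.bor_of_nonneg hacc (Int.natCast_nonneg _)]
    exact Int.natCast_nonneg _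

lemma mod_poly_nonneg (n : Int) : 0 ≤ _mod_poly_int n := mod_poly_aux _ 0 le_rfl

lemma gf2n_mul_eq (a b n : Int) (ha : 0 ≤ a) :
    gf2n_mul a b n =
      ((((PySem.List.pyRange 0 n 1).foldl
          (fun s _ => gstep (1 <<< n.toNat - 1)
            ((PySem.Int.bxor (_mod_poly_int n) ((1 <<< n.toNat : Nat) : Int)).toNat)
            (1 <<< (n.toNat - 1)) s)
          (a.toNat &&& (1 <<< n.toNat - 1),
           (PySem.Int.band b ((1 <<< n.toNat - 1 : Nat) : Int)).toNat, 0)).2.2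
        &&& (1 <<< n.toNat - 1) : Nat) : Int) := by
  have hb0 : PySem.Int.band b ((1 <<< n.toNat - 1 : Nat) : Int) =
      (((PySem.Int.band b ((1 <<< n.toNat - 1 : Nat) : Int)).toNat : Nat) : Int) := by
    rw [PySem.Int.band_comm]
    exact (Int.toNat_of_nonneg (PySem.Int.band_nonneg_of_nonneg_left b (Int.natCast_nonneg _))).symm
  have hred : PySem.Int.bxor (_mod_poly_int n) ((1 <<< n.toNat : Nat) : Int) =
      (((PySem.Int.bxor (_mod_poly_int n) ((1 <<< n.toNat : Nat) : Int)).toNat : Nat) : Int) :=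
    (Int.toNat_of_nonneg (bxor_nonneg _ _ (mod_poly_nonneg n) (Int.natCast_nonneg _))).symm
  have ha0 : PySem.Int.band a ((1 <<< n.toNat - 1 : Nat) : Int) =
      ((a.toNat &&& (1 <<< n.toNat - 1) : Nat) : Int) := by
    rw [← Int.toNat_of_nonneg ha, PySem.Int.band_natCast, Int.toNat_natCast]
  simp only [gf2n_mul]
  rw [ha0]
  conv_lhs => rw [hb0, hred]
  rw [show ((0:Int)) = ((0:Nat):Int) from rfl, gfold_cast, hb0, PySem.Int.band_natCast]

lemma gf2n_mul_nonneg (a b n : Int) : 0 ≤ gf2n_mul a b n := by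
  simp only [gf2n_mul]
  rw [PySem.Int.band_comm]
  exact PySem.Int.band_nonneg_of_nonneg_left _ (Int.natCast_nonneg _)

lemma gf2n_mul_zero (b n : Int) : gf2n_mul 0 b n = 0 := by
  rw [gf2n_mul_eq 0 b n le_rfl]
  simp only [Int.toNat_zero, Nat.zero_and]
  rw [(gfold_zero _ _ _ _ _).2]
  simp

lemma gf2n_mul_xor (p q b n : Int) (hp : 0 ≤ p) (hq : 0 ≤ q) :
    gf2n_mul (PySem.Int.bxor p q) b n = PySem.Int.bxor (gf2n_mul p b n) (gf2n_mul q b n) := by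
  rw [gf2n_mul_eq _ b n (bxor_nonneg p q hp hq), gf2n_mul_eq p b n hp, gf2n_mul_eq q b n hq]
  have ht : (PySem.Int.bxor p q).toNat = p.toNat ^^^ q.toNat := by
    rw [PySem.Int.bxor_of_nonneg hp hq, Int.toNat_natCast]
  rw [ht, Nat.and_xor_distrib_right, Nat.one_shiftLeft (n.toNat - 1)]
  have hlin := gfold_lin (1 <<< n.toNat - 1)
    ((PySem.Int.bxor (_mod_poly_int n) ((1 <<< n.toNat : Nat) : Int)).toNat)
    (n.toNat - 1) (PySem.List.pyRange 0 n 1)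
    (p.toNat &&& (1 <<< n.toNat - 1)) (q.toNat &&& (1 <<< n.toNat - 1))
    ((PySem.Int.band b ((1 <<< n.toNat - 1 : Nat) : Int)).toNat) 0 0
  simp only [Nat.xor_self] at hlin
  rw [hlin]
  simp [Nat.and_xor_distrib_right]

----------------------------------------------------------------
-- Part 3: the A-side fold as Fm, and the B-side as redSeq ∘ clm.
----------------------------------------------------------------

lemma gstep_Fm (M N : Nat) : ∀ (l : List Int) (a b c : Nat),
    (l.foldl (fun s _ => gstep (2 ^ N - 1) (M ^^^ 2 ^ N) (2 ^ (N-1)) s) (a, b, c)).2.2 =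
      c ^^^ Fm M N l.length a b := by
  intro l
  induction l with
  | nil => intro a b c; simp [Fm]
  | cons e l ih =>
    intro a b c
    rw [List.foldl_cons]
    have hg : gstep (2 ^ N - 1) (M ^^^ 2 ^ N) (2 ^ (N-1)) (a, b, c) =
        (astep M N a, b >>> 1, if b &&& 1 ≠ 0 then c ^^^ a else c) := by
      simp only [gstep, astep]
    rw [hg, ih]
    show (if b &&& 1 ≠ 0 then c ^^^ a else c) ^^^ Fm M N l.length (astep M N a) (b >>> 1) =
      c ^^^ Fm M N (l.length + 1) a b
    rw [show (l.length + 1) = l.length + 1 from rfl, Fm]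
    split <;> simp [Nat.xor_assoc]

lemma clmulAux_cast : ∀ (bN aN rN : Nat), _clmulAux (aN : Int) (bN : Int) (rN : Int) =
    ((rN ^^^ clm aN bN : Nat) : Int) := by
  intro bN
  induction bN using Nat.strong_induction_on with
  | _ bN ih =>
    intro aN rN
    rw [_clmulAux]
    by_cases hb : bN = 0
    · subst hb
      rw [clm]
      simp
    · have hpos : (0:Int) < (bN : Int) := by exact_mod_cast Nat.pos_of_ne_zero hb
      rw [dif_pos hpos]
      have hsh : ((aN : Int) <<< (1:Int)) = ((aN <<< 1 : Nat) : Int) := Int.shiftLeft_natCast aN 1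
      have hshr : ((bN : Int) >>> (1:Int)) = ((bN >>> 1 : Nat) : Int) := Int.shiftRight_natCast bN 1
      have hband : PySem.Int.band (bN : Int) 1 = ((bN &&& 1 : Nat) : Int) := by
        rw [show (1:Int) = ((1:Nat):Int) from rfl, PySem.Int.band_natCast]
      have hr : (if PySem.Int.band (bN : Int) 1 ≠ 0 then PySem.Int.bxor (rN : Int) (aN : Int) else (rN : Int)) =
          (((if bN &&& 1 ≠ 0 then rN ^^^ aN else rN : Nat) : Nat) : Int) := by
        rw [hband, PySem.Int.bxor_natCast]
        rw [if_congr (show (((bN &&& 1 : Nat) : Int) ≠ 0) ↔ ((bN &&& 1 : Nat) ≠ 0) from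
          not_congr Nat.cast_eq_zero) rfl rfl]
        exact (apply_ite (Nat.cast : Nat → Int) _ _ _).symm
      rw [hsh, hshr, hr]
      have hlt : bN >>> 1 < bN := by
        rw [Nat.shiftRight_eq_div_pow]
        omega
      rw [ih _ hlt]
      conv_rhs => rw [clm]
      rw [if_neg hb]
      exact congrArg _ (by split <;> simp [Nat.xor_assoc])

lemma descNat_succ (N K : Nat) : descNat N (K+1) = (N + K) :: descNat N K := by
  unfold descNat
  rw [List.range_succ]
  simp

lemma descNat_mem (N K : Nat) : ∀ j ∈ descNat N K, N ≤ j := by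
  intro j hj
  unfold descNat at hj
  simp at hj
  omega

lemma descNat_fold (M N : Nat) : ∀ (K p : Nat),
    (descNat N K).foldl (fun q j => rstep M N j q) p = redSeq M N K p := by
  intro K
  induction K with
  | zero => intro p; rfl
  | succ K ih =>
    intro p
    rw [descNat_succ, List.foldl_cons, ih, redSeq]

lemma bfold_cast (M N : Nat) (modI : Int) (hmod : modI = (M : Int)) :
    ∀ (l : List Nat), (∀ j ∈ l, N ≤ j) → ∀ (p : Nat),
    (l.map (Nat.cast : Nat → Int)).foldl
      (fun q i => if PySem.Int.band (q >>> (i.toNat : Int)) 1 ≠ 0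
                  then PySem.Int.bxor q (modI <<< (i - (N : Int)).toNat) else q)
      (p : Int)
    = ((l.foldl (fun q j => rstep M N j q) p : Nat) : Int) := by
  intro l
  induction l with
  | nil => intro _ p; rfl
  | cons j l ih =>
    intro hl p
    simp only [List.map_cons, List.foldl_cons]
    have hj : N ≤ j := hl j (by simp)
    have hstep : (if PySem.Int.band ((p : Int) >>> ((((j : Int)).toNat : Nat) : Int)) 1 ≠ 0
        then PySem.Int.bxor (p : Int) (modI <<< (((j : Int)) - (N : Int)).toNat) else (p : Int)) =
        ((rstep M N j p : Nat) : Int) := by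
      rw [hmod, Int.toNat_natCast,
        show (((j : Int)) - (N : Int)).toNat = j - N from by omega,
        Int.shiftRight_natCast p j,
        show (1:Int) = ((1:Nat):Int) from rfl, PySem.Int.band_natCast,
        show ((M : Int) <<< (j - N : Nat)) = ((M <<< (j - N) : Nat) : Int) from rfl,
        PySem.Int.bxor_natCast]
      rw [if_congr (show (((p >>> j &&& 1 : Nat) : Int) ≠ 0) ↔ ((p >>> j &&& 1 : Nat) ≠ 0) from
        not_congr Nat.cast_eq_zero) rfl rfl]
      exact (apply_ite (Nat.cast : Nat → Int) _ _ _).symm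
    rw [hstep, ih (fun j' hj' => hl j' (by simp [hj'])) _]

-- bound on a Python bitwise-and with a nonnegative mask
lemma band_toNat_le (x : Int) (m : Nat) : (PySem.Int.band x (m : Int)).toNat ≤ m := by
  unfold PySem.Int.band
  split_ifs with h1 h2 h3
  · rw [Int.toNat_natCast, Int.toNat_natCast]
    exact Nat.and_le_right
  · exact absurd (Int.natCast_nonneg m) h2
  · rw [Int.toNat_natCast, Int.toNat_natCast]
    omega
  · exact absurd (Int.natCast_nonneg m) h3

-- the multiplication bridge: for nonnegative a and table n, B's _gf_mul = A's gf2n_mul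
lemma Meq_core (a b : Int) (ha : 0 ≤ a) (N M : Nat) (n : Int)
    (hn : n = (N : Int)) (hN : 1 ≤ N)
    (hdict : PySem.Dict.getD MOD_INT n 0 = (M : Int))
    (hmod : _mod_poly_int n = (M : Int))
    (hM : M.testBit N = true) (hMlt : M < 2 ^ (N+1))
    (hrA : (PySem.List.pyRange 0 n 1).length = N)
    (hrB : (PySem.List.pyRange n (2*n - 1) 1).reverse = (descNat N (N-1)).map (Nat.cast : Nat → Int)) :
    _gf_mul a b n = gf2n_mul a b n := by
  subst hn
  have htn : ((N : Int)).toNat = N := Int.toNat_natCast N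
  have haN_lt : a.toNat &&& (2 ^ N - 1) < 2 ^ N := by
    have h1 := Nat.and_le_right (n := a.toNat) (m := 2 ^ N - 1)
    have h2 : 0 < (2:Nat) ^ N := Nat.two_pow_pos N
    omega
  have hbN_lt : (PySem.Int.band b ((2 ^ N - 1 : Nat) : Int)).toNat < 2 ^ N := by
    have h1 := band_toNat_le b (2 ^ N - 1)
    have h2 : 0 < (2:Nat) ^ N := Nat.two_pow_pos N
    omega
  have hmaskN : (1 <<< ((N : Int)).toNat : Nat) = 2 ^ N := by rw [htn, Nat.one_shiftLeft]
  have hredN : (PySem.Int.bxor (_mod_poly_int (N : Int)) ((1 <<< ((N : Int)).toNat : Nat) : Int)).toNat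
      = M ^^^ 2 ^ N := by
    rw [hmod, hmaskN, PySem.Int.bxor_natCast, Int.toNat_natCast]
  have hA : gf2n_mul a b (N : Int) =
      ((Fm M N N (a.toNat &&& (2 ^ N - 1)) ((PySem.Int.band b ((2 ^ N - 1 : Nat) : Int)).toNat)
        &&& (2 ^ N - 1) : Nat) : Int) := by
    rw [gf2n_mul_eq a b (N : Int) ha, hredN, hmaskN, htn]
    simp only [Nat.one_shiftLeft]
    rw [gstep_Fm, hrA]
    simp
  have hA' : gf2n_mul a b (N : Int) =
      ((Fm M N N (a.toNat &&& (2 ^ N - 1)) ((PySem.Int.band b ((2 ^ N - 1 : Nat) : Int)).toNat) : Nat) : Int) := by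
    rw [hA, Nat.and_two_pow_sub_one_eq_mod,
      Nat.mod_eq_of_lt (Fm_lt hM hMlt N _ _ haN_lt)]
  have hbandA : PySem.Int.band a ((2 ^ N - 1 : Nat) : Int) = ((a.toNat &&& (2 ^ N - 1) : Nat) : Int) := by
    rw [← Int.toNat_of_nonneg ha, PySem.Int.band_natCast, Int.toNat_natCast]
  have hbandB : PySem.Int.band b ((2 ^ N - 1 : Nat) : Int)
      = (((PySem.Int.band b ((2 ^ N - 1 : Nat) : Int)).toNat : Nat) : Int) := by
    rw [Int.toNat_of_nonneg]
    rw [PySem.Int.band_comm]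
    exact PySem.Int.band_nonneg_of_nonneg_left _ (Int.natCast_nonneg _)
  have hB : _gf_mul a b (N : Int) =
      ((redSeq M N (N-1)
        (clm (a.toNat &&& (2 ^ N - 1)) ((PySem.Int.band b ((2 ^ N - 1 : Nat) : Int)).toNat)) : Nat) : Int) := by
    simp only [_gf_mul]
    rw [hmaskN, hbandA]
    conv_lhs => rw [hbandB]
    rw [show _clmul ((a.toNat &&& (2 ^ N - 1) : Nat) : Int)
          (((PySem.Int.band b ((2 ^ N - 1 : Nat) : Int)).toNat : Nat) : Int)
        = ((clm (a.toNat &&& (2 ^ N - 1)) ((PySem.Int.band b ((2 ^ N - 1 : Nat) : Int)).toNat) : Nat) : Int) from by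
      unfold _clmul
      rw [show (0:Int) = ((0:Nat):Int) from rfl, clmulAux_cast]
      simp]
    rw [hrB, bfold_cast M N _ hdict (descNat N (N-1)) (descNat_mem N (N-1)), descNat_fold]
  rw [hA', hB, main_nat hN hM hMlt _ _ haN_lt hbN_lt]

lemma Meq (a b n : Int) (ha : 0 ≤ a) (h2 : 2 ≤ n) (h10 : n ≤ 10) :
    _gf_mul a b n = gf2n_mul a b n := by
  interval_cases n
  · exact Meq_core a b ha 2 7 2 (by norm_num) (by norm_num) (by decide) (by decide) (by decide) (by decide) (by decide) (by decide)
  · exact Meq_core a b ha 3 11 3 (by norm_num) (by norm_num) (by decide) (by decide) (by decide) (by decide) (by decide) (by decide)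
  · exact Meq_core a b ha 4 19 4 (by norm_num) (by norm_num) (by decide) (by decide) (by decide) (by decide) (by decide) (by decide)
  · exact Meq_core a b ha 5 37 5 (by norm_num) (by norm_num) (by decide) (by decide) (by decide) (by decide) (by decide) (by decide)
  · exact Meq_core a b ha 6 67 6 (by norm_num) (by norm_num) (by decide) (by decide) (by decide) (by decide) (by decide) (by decide)
  · exact Meq_core a b ha 7 131 7 (by norm_num) (by norm_num) (by decide) (by decide) (by decide) (by decide) (by decide) (by decide)
  · exact Meq_core a b ha 8 285 8 (by norm_num) (by norm_num) (by decide) (by decide) (by decide) (by decide) (by decide) (by decide)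
  · exact Meq_core a b ha 9 529 9 (by norm_num) (by norm_num) (by decide) (by decide) (by decide) (by decide) (by decide) (by decide)
  · exact Meq_core a b ha 10 1033 10 (by norm_num) (by norm_num) (by decide) (by decide) (by decide) (by decide) (by decide) (by decide)

----------------------------------------------------------------
-- Part 4: Horner vs successive powers (the "sum of odd-coefficient powers").
----------------------------------------------------------------

def Sm (x n : Int) : List Int → Int → Int
  | [], _ => 0
  | c :: cs, xp =>
      PySem.Int.bxor (if PySem.Int.band c 1 ≠ 0 then xp else 0) (Sm x n cs (gf2n_mul xp x n))

lemma Sm_nonneg (x n : Int) (cs : List Int) (xp : Int) (hxp : 0 ≤ xp) : 0 ≤ Sm x n cs xp := by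
  induction cs generalizing xp with
  | nil => simp [Sm]
  | cons c cs ih =>
    refine bxor_nonneg _ _ ?_ (ih _ (gf2n_mul_nonneg _ _ _))
    split <;> simp [hxp]

lemma A_fold (x n : Int) (cs : List Int) (res xp : Int) (hres : 0 ≤ res) (hxp : 0 ≤ xp) :
    (cs.foldl
      (fun (s : Int × Int) c =>
        ((if PySem.Int.band c 1 ≠ 0 then PySem.Int.bxor s.1 s.2 else s.1), gf2n_mul s.2 x n))
      (res, xp)).1 = PySem.Int.bxor res (Sm x n cs xp) := by
  induction cs generalizing res xp with
  | nil => simp [Sm]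
  | cons c cs ih =>
    rw [List.foldl_cons]
    rw [ih _ _ (by dsimp only; split; exacts [bxor_nonneg _ _ hres hxp, hres]) (gf2n_mul_nonneg _ _ _)]
    rw [Sm, ← bxor_assoc' res _ _ hres (by split <;> simp [hxp]) (Sm_nonneg _ _ _ _ (gf2n_mul_nonneg _ _ _))]
    congr 1
    split
    · rfl
    · simp

lemma mul_Sm (x n : Int) (cs : List Int) (xp : Int) (hxp : 0 ≤ xp) :
    gf2n_mul (Sm x n cs xp) x n = Sm x n cs (gf2n_mul xp x n) := by
  induction cs generalizing xp with
  | nil => exact gf2n_mul_zero x n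
  | cons c cs ih =>
    rw [Sm, gf2n_mul_xor _ _ x n (by split <;> simp [hxp]) (Sm_nonneg _ _ _ _ (gf2n_mul_nonneg _ _ _))]
    rw [ih _ (gf2n_mul_nonneg _ _ _), Sm]
    congr 1
    split
    · rfl
    · exact gf2n_mul_zero x n

lemma B_foldr (x n : Int) (cs : List Int) :
    cs.foldr (fun c res => PySem.Int.bxor (gf2n_mul res x n) (PySem.Int.band c 1)) 0 =
      Sm x n cs 1 := by
  induction cs with
  | nil => rfl
  | cons c cs ih =>
    rw [List.foldr_cons, ih, mul_Sm x n cs 1 zero_le_one, Sm]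
    have hb : PySem.Int.band c 1 = 0 ∨ PySem.Int.band c 1 = 1 := by
      rw [PySem.Int.band_one]
      have h1 := PySem.Int.mod_nonneg c (b := 2) (by norm_num)
      have h2 := PySem.Int.mod_lt c (b := 2) (by norm_num)
      omega
    rcases hb with hb | hb <;> rw [hb]
    · simp
      rw [PySem.Int.bxor_comm 0, PySem.Int.bxor_zero]
    · rw [PySem.Int.bxor_comm]
      simp

-- B's Horner foldr with _gf_mul rewritten to gf2n_mul (the accumulator stays nonnegative)
lemma B_bridge (x n : Int) (h2 : 2 ≤ n) (h10 : n ≤ 10) (cs : List Int) :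
    cs.foldr (fun c res => PySem.Int.bxor (_gf_mul res x n) (PySem.Int.band c 1)) 0 =
      cs.foldr (fun c res => PySem.Int.bxor (gf2n_mul res x n) (PySem.Int.band c 1)) 0 ∧
    0 ≤ cs.foldr (fun c res => PySem.Int.bxor (gf2n_mul res x n) (PySem.Int.band c 1)) 0 := by
  induction cs with
  | nil => exact ⟨rfl, le_rfl⟩
  | cons c cs ih =>
    obtain ⟨heq, hnn⟩ := ih
    have hband : 0 ≤ PySem.Int.band c 1 := by
      rw [PySem.Int.band_one]
      exact PySem.Int.mod_nonneg c (by norm_num)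
    constructor
    · rw [List.foldr_cons, List.foldr_cons, heq, Meq _ x n hnn h2 h10]
    · exact bxor_nonneg _ _ (gf2n_mul_nonneg _ _ _) hband

-- ===== VERDICT (by name: the statement is the Claim_ definition above) =====
theorem poly_eval_gf2n_spec : Claim_equal_poly_eval_gf2n := by
  intro coeffs x n _ hpre
  unfold Spec_poly_eval_gf2n
  rcases hpre with rfl | ⟨h2, h10⟩
  · rfl
  · unfold poly_eval_gf2n poly_eval_gf2n_alt
    rw [List.foldl_reverse, (B_bridge x n h2 h10 coeffs).1, B_foldr,
      A_fold x n coeffs 0 1 le_rfl zero_le_one]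
    rw [PySem.Int.bxor_comm, PySem.Int.bxor_zero]
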